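-- pv_equiv track=rewrite | github.com/SamRoutt/Python | proj2.py | findStartPos
-- ===== SOURCE A (Python) =====
-- def findStartPos(word, puzzle, row, col, startPositions):
--     firstLetter = word[0]
--     #Terminates if each element in puzzle has been searched.
--     if row < len(puzzle):
--         #Checks all columns in row and finds pos of letters that match firstLetter of word.
--         if col < len(puzzle[0]):
--             #Compares element in puzzle to first letter of word
--             if puzzle[row][col] == firstLetter:
--                 startPositions.append([row, col])
--             col += 1
--         else:
--             row += 1
--             col = 0
--         findStartPos(word, puzzle, row, col, startPositions)
--     return startPositions
-- ===== SOURCE B (Python) =====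
-- def findStartPos(word, puzzle, row, col, startPositions):
--     # Iterative rewrite: scan the tail of the starting row, then every later row in full.
--     firstLetter = word[0]
--     if row < len(puzzle):
--         width = len(puzzle[0])
--         for c in range(col, width):
--             if puzzle[row][c] == firstLetter:
--                 startPositions.append([row, c])
--         for r in range(row + 1, len(puzzle)):
--             for c in range(width):
--                 if puzzle[r][c] == firstLetter:
--                     startPositions.append([r, c])
--     return startPositions
-- ===== Notes on version B (the rewrite author's own statement) =====
-- stated objective: idiomatic
-- what changed: Replaces A's one-cell-per-call recursion over (row, col) with explicit iterative loops: scan the tail of the starting row, then each later row in full.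
import Mathlib
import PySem

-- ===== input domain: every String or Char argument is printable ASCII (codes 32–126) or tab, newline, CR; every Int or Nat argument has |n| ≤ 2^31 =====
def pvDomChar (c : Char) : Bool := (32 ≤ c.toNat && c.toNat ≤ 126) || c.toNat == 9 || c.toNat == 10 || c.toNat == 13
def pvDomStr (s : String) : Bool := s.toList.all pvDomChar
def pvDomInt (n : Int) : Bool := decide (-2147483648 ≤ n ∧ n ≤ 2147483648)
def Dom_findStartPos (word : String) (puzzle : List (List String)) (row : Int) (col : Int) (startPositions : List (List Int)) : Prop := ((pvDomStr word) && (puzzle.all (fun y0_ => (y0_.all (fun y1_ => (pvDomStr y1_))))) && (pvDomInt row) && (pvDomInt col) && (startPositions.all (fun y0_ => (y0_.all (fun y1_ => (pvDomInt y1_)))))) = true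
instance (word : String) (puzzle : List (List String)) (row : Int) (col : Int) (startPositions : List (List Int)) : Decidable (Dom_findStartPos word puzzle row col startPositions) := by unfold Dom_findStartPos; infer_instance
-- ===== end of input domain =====

-- B replaces A's per-cell (row, col) recursion by explicit row loops (first row from col, later rows in full); equivalence is about the RETURN value (both Pythons also append the same elements to startPositions in the same order).


-- ===== PORT A =====
-- shared cell accessor: puzzle[r][c] with Python indexing; the default "" is never
-- consulted under Pre_ (pyGet? is some on every admitted access)
def pvCell (puzzle : List (List String)) (r c : Int) : String :=
  (PySem.List.pyGet? ((PySem.List.pyGet? puzzle r).getD []) c).getD ""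

-- A's recursion, literal: if row < len(puzzle): if col < len(puzzle[0]): maybe-append, col += 1
-- else: row += 1; col = 0; recurse; return acc
def pvFindA (fl : String) (puzzle : List (List String)) (row col : Int) (acc : List (List Int)) :
    List (List Int) :=
  if _h : row < (puzzle.length : Int) then
    if col < ((puzzle.headD []).length : Int) then
      pvFindA fl puzzle row (col + 1)
        (if pvCell puzzle row col == fl then acc ++ [[row, col]] else acc)
    else
      pvFindA fl puzzle (row + 1) 0 acc
  else acc
termination_by (((puzzle.length : Int) - row).toNat, (((puzzle.headD []).length : Int) - col).toNat)
decreasing_by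
  · apply Prod.Lex.right; omega
  · apply Prod.Lex.left; omega

def findStartPos (word : String) (puzzle : List (List String)) (row : Int) (col : Int)
    (startPositions : List (List Int)) : List (List Int) :=
  pvFindA (((PySem.Str.pyGet? word 0).map (fun c => String.ofList [c])).getD "") puzzle row col startPositions

-- ===== PORT B =====
-- one row scan: for c in cols: if puzzle[r][c] == fl: append [r, c]
def pvScanRow (fl : String) (puzzle : List (List String)) (r : Int) (cols : List Int)
    (acc : List (List Int)) : List (List Int) :=
  cols.foldl (fun a c => if pvCell puzzle r c == fl then a ++ [[r, c]] else a) acc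

-- B's body after firstLetter: tail of the starting row, then every later row in full
def pvB (fl : String) (puzzle : List (List String)) (row col : Int) (acc : List (List Int)) :
    List (List Int) :=
  if row < (puzzle.length : Int) then
    (PySem.List.pyRange (row + 1) (puzzle.length : Int) 1).foldl
      (fun a r => pvScanRow fl puzzle r (PySem.List.pyRange 0 ((puzzle.headD []).length : Int) 1) a)
      (pvScanRow fl puzzle row (PySem.List.pyRange col ((puzzle.headD []).length : Int) 1) acc)
  else acc

def findStartPos_alt (word : String) (puzzle : List (List String)) (row : Int) (col : Int)
    (startPositions : List (List Int)) : List (List Int) :=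
  pvB (((PySem.Str.pyGet? word 0).map (fun c => String.ofList [c])).getD "") puzzle row col startPositions

-- ===== PRECONDITION & SPEC =====
-- length of puzzle[r] (Python indexing), as an Int
def pvWlen (puzzle : List (List String)) (r : Int) : Int :=
  (((PySem.List.pyGet? puzzle r).getD []).length : Int)

-- Pre_ excludes exactly the inputs where A raises: empty word (word[0] IndexError) and any
-- grid/row/col for which some visited cell access puzzle[r][c] is out of range (IndexError),
-- including puzzle[0] on an empty grid with negative row.
def Pre_findStartPos (word : String) (puzzle : List (List String)) (row : Int) (col : Int)
    (startPositions : List (List Int)) : Prop :=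
  word.toList ≠ [] ∧
  (row < (puzzle.length : Int) →
    puzzle ≠ [] ∧
    (col < ((puzzle.headD []).length : Int) →
      -(puzzle.length : Int) ≤ row ∧ -(pvWlen puzzle row) ≤ col ∧
      (0 < ((puzzle.headD []).length : Int) →
        ((puzzle.headD []).length : Int) ≤ pvWlen puzzle row)) ∧
    (0 < ((puzzle.headD []).length : Int) →
      -(puzzle.length : Int) ≤ row + 1 ∧
      ∀ r ∈ PySem.List.pyRange (row + 1) (puzzle.length : Int) 1,
        ((puzzle.headD []).length : Int) ≤ pvWlen puzzle r))

instance (word : String) (puzzle : List (List String)) (row : Int) (col : Int) (startPositions : List (List Int)) : Decidable (Pre_findStartPos word puzzle row col startPositions) := by unfold Pre_findStartPos; infer_instance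

def pvWitness_findStartPos : String × List (List String) × Int × Int × List (List Int) :=
  ("ab", [["a", "b"], ["c", "a"]], 0, 0, [])

def Spec_findStartPos (word : String) (puzzle : List (List String)) (row : Int) (col : Int) (startPositions : List (List Int)) (out : List (List Int)) : Prop := out = findStartPos_alt word puzzle row col startPositions
instance (word : String) (puzzle : List (List String)) (row : Int) (col : Int) (startPositions : List (List Int)) (out : List (List Int)) : Decidable (Spec_findStartPos word puzzle row col startPositions out) := by unfold Spec_findStartPos; infer_instance

-- ===== CLAIM (what is proved, stated in full; the proofs are below) =====
def Claim_equal_findStartPos : Prop := ∀ (word : String) (puzzle : List (List String)) (row : Int) (col : Int) (startPositions : List (List Int)), Dom_findStartPos word puzzle row col startPositions → Pre_findStartPos word puzzle row col startPositions → Spec_findStartPos word puzzle row col startPositions (findStartPos word puzzle row col startPositions)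

-- ===== LEMMAS AND PROOFS =====

-- The heart of the file: A's (row, col) recursion computes B's row-by-row folds, for every
-- input (no precondition needed: both ports read cells through the same total accessor).
theorem pvFindA_eq_pvB (fl : String) (puzzle : List (List String)) (row col : Int)
    (acc : List (List Int)) : pvFindA fl puzzle row col acc = pvB fl puzzle row col acc := by
  fun_induction pvFindA fl puzzle row col acc with
  | case1 row col acc h hcol ih =>
    simp only [dite_eq_ite] at ih
    rw [ih, pvB, pvB, if_pos h, if_pos h, PySem.List.pyRange_one_cons hcol]
    simp [pvScanRow]
  | case2 row col acc h hcol ih =>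
    rw [ih, pvB, pvB, if_pos h]
    by_cases h2 : row + 1 < (puzzle.length : Int)
    · rw [if_pos h2, PySem.List.pyRange_one_cons h2,
        PySem.List.pyRange_one_eq_nil (le_of_not_gt hcol)]
      simp [pvScanRow]
    · rw [if_neg h2, PySem.List.pyRange_one_eq_nil (le_of_not_gt h2),
        PySem.List.pyRange_one_eq_nil (le_of_not_gt hcol)]
      simp [pvScanRow]
  | case3 row col acc h =>
    rw [pvB, if_neg h]

-- ===== VERDICT (by name: the statement is the Claim_ definition above) =====
theorem findStartPos_spec : Claim_equal_findStartPos := by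
  intro word puzzle row col startPositions _ _
  unfold Spec_findStartPos findStartPos findStartPos_alt
  exact pvFindA_eq_pvB _ _ _ _ _
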